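-- pv_equiv track=rewrite | github.com/marleyabe/scraping-tabnet | src/scraping_tabnet/scraper.py | generate_periods
-- ===== SOURCE A (Python) =====
-- MONTHS_PT = [
--     "Jan", "Fev", "Mar", "Abr", "Mai", "Jun",
--     "Jul", "Ago", "Set", "Out", "Nov", "Dez",
-- ]
--
-- def generate_periods(start_month: int, start_year: int, end_month: int, end_year: int) -> list[tuple[str, str]]:
--     """Retorna lista de (label, filename) do período informado."""
--     periods = []
--     year, month = start_year, start_month
--     while (year, month) <= (end_year, end_month):
--         label = f"{MONTHS_PT[month - 1]}/{year}"
--         filename = f"qabr{year % 100:02d}{month:02d}.dbf"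
--         periods.append((label, filename))
--         month += 1
--         if month > 12:
--             month = 1
--             year += 1
--     return periods
-- ===== SOURCE B (Python) =====
-- MONTHS_PT = [
--     "Jan", "Fev", "Mar", "Abr", "Mai", "Jun",
--     "Jul", "Ago", "Set", "Out", "Nov", "Dez",
-- ]
--
-- def generate_periods(start_month: int, start_year: int, end_month: int, end_year: int) -> list[tuple[str, str]]:
--     """Retorna lista de (label, filename) do período informado."""
--     si = start_year * 12 + (start_month - 1)
--     ei = end_year * 12 + (end_month - 1)
--     periods = []
--     for idx in range(si, ei + 1):
--         year, m0 = divmod(idx, 12)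
--         month = m0 + 1
--         periods.append((f"{MONTHS_PT[m0]}/{year}", f"qabr{year % 100:02d}{month:02d}.dbf"))
--     return periods
-- ===== Notes on version B (the rewrite author's own statement) =====
-- stated objective: simpler
-- what changed: Replaces the while-loop with tuple comparison and month>12 rollover branch by a single for over a precomputed absolute-month-index range, recovering (year, month) by divmod(idx, 12).
-- outside the precondition, e.g. on generate_periods(0, 0, 0, 0): A returns [('Dez/0', 'qabr0000.dbf')], B returns [('Dez/-1', 'qabr9912.dbf')]; on generate_periods(1, 1, 14, 0): A returns [], B returns [('Jan/1', 'qabr0101.dbf'), ('Fev/1', 'qabr0102.dbf')]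
import Mathlib
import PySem

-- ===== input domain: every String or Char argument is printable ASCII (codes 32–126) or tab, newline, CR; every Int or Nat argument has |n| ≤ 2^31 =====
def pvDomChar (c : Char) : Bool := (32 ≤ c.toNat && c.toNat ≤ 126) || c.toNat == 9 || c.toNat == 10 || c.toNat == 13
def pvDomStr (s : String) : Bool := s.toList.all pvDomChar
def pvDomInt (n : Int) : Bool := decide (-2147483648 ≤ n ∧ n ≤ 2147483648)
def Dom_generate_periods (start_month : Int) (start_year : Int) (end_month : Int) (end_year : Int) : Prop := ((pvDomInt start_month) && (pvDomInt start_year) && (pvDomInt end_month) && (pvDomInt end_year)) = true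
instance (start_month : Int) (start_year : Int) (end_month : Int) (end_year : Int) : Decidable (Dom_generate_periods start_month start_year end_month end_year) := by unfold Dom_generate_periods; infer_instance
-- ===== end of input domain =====

-- B replaces A's while-loop (tuple guard + month>12 rollover) by one pass over a precomputed
-- absolute-month-index range, recovering (year, month) with divmod(idx, 12); same cost, simpler shape.

-- ===== PORT A =====
def MONTHS_PT : List String :=
  ["Jan", "Fev", "Mar", "Abr", "Mai", "Jun", "Jul", "Ago", "Set", "Out", "Nov", "Dez"]

-- f"{n:02d}" for any int (zfill keeps the sign in front, exactly like the 02d format spec)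
def pyPad2 (n : Int) : String := PySem.Str.zfill (PySem.Int.toStr n) 2

-- f"{mon}/{year}"
def mkLabel (mon : String) (year : Int) : String := mon ++ "/" ++ PySem.Int.toStr year

-- f"qabr{year % 100:02d}{month:02d}.dbf"
def mkFilename (year month : Int) : String :=
  "qabr" ++ pyPad2 (PySem.Int.mod year 100) ++ pyPad2 month ++ ".dbf"

-- the while-loop of A; (year, month) <= (end_year, end_month) is Python tuple comparison.
-- MONTHS_PT[month - 1] is pyGet?; the .getD "" default is only reached where Python raises
-- IndexError (excluded by Pre_generate_periods).
def genLoopA (end_month end_year : Int) (year month : Int)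
    (periods : List (String × String)) : List (String × String) :=
  if year < end_year ∨ (year = end_year ∧ month ≤ end_month) then
    -- label = f"…"; filename = f"…"; periods.append((label, filename))
    if month + 1 > 12 then
      genLoopA end_month end_year (year + 1) 1
        (periods ++ [(mkLabel ((PySem.List.pyGet? MONTHS_PT (month - 1)).getD "") year,
                      mkFilename year month)])
    else
      genLoopA end_month end_year year (month + 1)
        (periods ++ [(mkLabel ((PySem.List.pyGet? MONTHS_PT (month - 1)).getD "") year,
                      mkFilename year month)])
  else periods
termination_by ((end_year + 1 - year).toNat * 15 + (14 - month).toNat)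
decreasing_by all_goals omega

def generate_periods (start_month : Int) (start_year : Int) (end_month : Int) (end_year : Int) :
    List (String × String) :=
  genLoopA end_month end_year start_year start_month []

-- ===== PORT B =====
def entryB (idx : Int) : String × String :=
  let year := PySem.Int.floordiv idx 12
  let m0 := PySem.Int.mod idx 12
  let month := m0 + 1
  (mkLabel ((PySem.List.pyGet? MONTHS_PT m0).getD "") year, mkFilename year month)

def generate_periods_alt (start_month : Int) (start_year : Int) (end_month : Int) (end_year : Int) :
    List (String × String) :=
  let si := start_year * 12 + (start_month - 1)
  let ei := end_year * 12 + (end_month - 1)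
  (PySem.List.pyRange si (ei + 1) 1).foldl (fun periods idx => periods ++ [entryB idx]) []

-- ===== PRECONDITION & SPEC =====
-- Pre_ excludes month arguments outside 1..12 except where the period is empty under both A's
-- lexicographic test and B's month-index test: a month outside 1..12 is meaningless for this
-- calendar task — A raises IndexError (start_month ≥ 13 or ≤ -12), wraps the negative list index
-- (start_month in -11..0) or reads an out-of-range end_month non-calendrically, while B
-- normalizes arithmetically; neither behaviour is specified.
def Pre_generate_periods (start_month : Int) (start_year : Int) (end_month : Int) (end_year : Int) : Prop :=
  (1 ≤ start_month ∧ start_month ≤ 12 ∧ 1 ≤ end_month ∧ end_month ≤ 12) ∨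
  ((end_year < start_year ∨ (end_year = start_year ∧ end_month < start_month)) ∧
    end_year * 12 + end_month < start_year * 12 + start_month)
instance (start_month : Int) (start_year : Int) (end_month : Int) (end_year : Int) :
    Decidable (Pre_generate_periods start_month start_year end_month end_year) := by
  unfold Pre_generate_periods; infer_instance

def pvWitness_generate_periods : Int × Int × Int × Int := (11, 1999, 2, 2000)

def Spec_generate_periods (start_month : Int) (start_year : Int) (end_month : Int) (end_year : Int)
    (out : List (String × String)) : Prop :=
  out = generate_periods_alt start_month start_year end_month end_year
instance (start_month : Int) (start_year : Int) (end_month : Int) (end_year : Int)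
    (out : List (String × String)) :
    Decidable (Spec_generate_periods start_month start_year end_month end_year out) := by
  unfold Spec_generate_periods; infer_instance

-- ===== CLAIM (what is proved, stated in full; the proofs are below) =====
def Claim_equal_generate_periods : Prop :=
  ∀ (start_month : Int) (start_year : Int) (end_month : Int) (end_year : Int),
    Dom_generate_periods start_month start_year end_month end_year →
    Pre_generate_periods start_month start_year end_month end_year →
    Spec_generate_periods start_month start_year end_month end_year
      (generate_periods start_month start_year end_month end_year)

-- ===== LEMMAS AND PROOFS =====

-- B's entry at absolute index 12*y + (m-1) is exactly A's loop body at (y, m), for 1 ≤ m ≤ 12.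
lemma entryB_eq (y m : Int) (h1 : 1 ≤ m) (h2 : m ≤ 12) :
    entryB (y * 12 + (m - 1)) =
      (mkLabel ((PySem.List.pyGet? MONTHS_PT (m - 1)).getD "") y, mkFilename y m) := by
  have hd : PySem.Int.floordiv (y * 12 + (m - 1)) 12 = y := by
    rw [PySem.Int.floordiv_eq_iff_of_pos (by norm_num)]
    constructor <;> nlinarith
  have hm : PySem.Int.mod (y * 12 + (m - 1)) 12 = m - 1 := by
    have := PySem.Int.floordiv_mul_add_mod (y * 12 + (m - 1)) 12
    rw [hd] at this; omega
  have hmm : m - 1 + 1 = m := by ring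
  simp only [entryB]
  rw [hd, hm, hmm]

-- A's loop, started at a valid month, appends exactly the B-entries of the remaining index range.
lemma genLoopA_eq (em ey : Int) (hem1 : 1 ≤ em) (hem2 : em ≤ 12) :
    ∀ (n : Nat) (y m : Int) (acc : List (String × String)),
      1 ≤ m → m ≤ 12 → n = (ey * 12 + em - (y * 12 + (m - 1))).toNat →
      genLoopA em ey y m acc =
        acc ++ (PySem.List.pyRange (y * 12 + (m - 1)) (ey * 12 + (em - 1) + 1) 1).map entryB := by
  intro n
  induction n using Nat.strong_induction_on with
  | _ n ih =>
    intro y m acc hm1 hm2 hn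
    rw [genLoopA]
    by_cases hg : y < ey ∨ (y = ey ∧ m ≤ em)
    · have hidx : y * 12 + (m - 1) < ey * 12 + (em - 1) + 1 := by omega
      rw [if_pos hg, PySem.List.pyRange_one_cons hidx, List.map_cons]
      by_cases h12 : m + 1 > 12
      · rw [if_pos h12,
          ih (n - 1) (by omega) (y + 1) 1 _ (by omega) (by omega) (by omega),
          show (y + 1) * 12 + (1 - 1) = y * 12 + (m - 1) + 1 by omega,
          ← entryB_eq y m hm1 hm2]
        simp
      · rw [if_neg h12,
          ih (n - 1) (by omega) y (m + 1) _ (by omega) (by omega) (by omega),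
          show y * 12 + (m + 1 - 1) = y * 12 + (m - 1) + 1 by omega,
          ← entryB_eq y m hm1 hm2]
        simp
    · have hidx : ey * 12 + (em - 1) + 1 ≤ y * 12 + (m - 1) := by omega
      rw [if_neg hg, PySem.List.pyRange_one_eq_nil hidx, List.map_nil, List.append_nil]

-- ===== VERDICT (by name: the statement is the Claim_ definition above) =====
theorem generate_periods_spec : Claim_equal_generate_periods := by
  intro sm sy em ey _hDom hPre
  unfold Spec_generate_periods generate_periods generate_periods_alt
  rw [PySem.List.foldl_append_singleton_eq_map, List.nil_append]
  rcases hPre with ⟨hsm1, hsm2, hem1, hem2⟩ | ⟨hlex, hlin⟩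
  · have := genLoopA_eq em ey hem1 hem2 (ey * 12 + em - (sy * 12 + (sm - 1))).toNat sy sm []
      hsm1 hsm2 rfl
    rw [this, List.nil_append]
  · rw [genLoopA, if_neg (by omega), PySem.List.pyRange_one_eq_nil (by omega)]
    simp
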